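-- pv_equiv track=rewrite | github.com/ColinFendrick/CodeWarsSolutions | check-three-and-two.py | check_three_and_two
-- ===== SOURCE A (Python) =====
-- def check_three_and_two(array):
--   two, three = False, False
--   for el in array:
--     if array.count(el) == 2:
--       two = True
--     if array.count(el) == 3:
--       three = True
--     if two == three == True:
--       return True
--   return False
-- ===== SOURCE B (Python) =====
-- def check_three_and_two(array):
--     counts = {}
--     for el in array:
--         counts[el] = counts.get(el, 0) + 1
--     vals = set(counts.values())
--     return 2 in vals and 3 in vals
-- ===== Notes on version B (the rewrite author's own statement) =====
-- stated objective: faster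
-- what changed: Replaces the flag-carrying loop that rescans the whole list with array.count on every iteration by a frequency dictionary built in one pass, followed by two membership tests on the set of count values.
import Mathlib
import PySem

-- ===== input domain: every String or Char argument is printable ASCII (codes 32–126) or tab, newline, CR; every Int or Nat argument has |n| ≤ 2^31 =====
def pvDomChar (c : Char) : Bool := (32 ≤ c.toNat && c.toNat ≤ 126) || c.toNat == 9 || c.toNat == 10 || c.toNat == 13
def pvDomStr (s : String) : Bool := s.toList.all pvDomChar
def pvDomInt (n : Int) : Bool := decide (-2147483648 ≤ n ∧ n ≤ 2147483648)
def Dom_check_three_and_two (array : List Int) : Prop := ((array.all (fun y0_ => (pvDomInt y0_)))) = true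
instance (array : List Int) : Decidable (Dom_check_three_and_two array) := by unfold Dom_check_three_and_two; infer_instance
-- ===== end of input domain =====

-- B replaces A's O(n^2) flag loop (array.count per element, early return) by a one-pass
-- frequency dictionary followed by two membership tests on the set of its count values (faster).

-- ===== PORT A =====
-- the for-loop over `array` with accumulators two/three and an early `return True`
def pvLoopA (array : List Int) : List Int → Bool → Bool → Bool
  | [], _, _ => false
  | el :: rest, two, three =>
    let two := if array.count el = 2 then true else two
    let three := if array.count el = 3 then true else three
    if two && three then true else pvLoopA array rest two three

def check_three_and_two (array : List Int) : Bool := pvLoopA array array false false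

-- ===== PORT B =====
def check_three_and_two_alt (array : List Int) : Bool :=
  let counts := array.foldl (fun d x => d.insert x (d.getD x 0 + 1)) (PySem.Dict.empty : PySem.Dict Int Int)
  let vals := PySem.Set.ofList counts.values
  PySem.Set.contains vals 2 && PySem.Set.contains vals 3

-- ===== PRECONDITION & SPEC =====
def Spec_check_three_and_two (array : List Int) (out : Bool) : Prop := out = check_three_and_two_alt array
instance (array : List Int) (out : Bool) : Decidable (Spec_check_three_and_two array out) := by unfold Spec_check_three_and_two; infer_instance

-- ===== CLAIM (what is proved, stated in full; the proofs are below) =====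
def Claim_equal_check_three_and_two : Prop := ∀ (array : List Int), Dom_check_three_and_two array → Spec_check_three_and_two array (check_three_and_two array)

-- ===== LEMMAS AND PROOFS =====

-- A's loop, with flags not yet both set, decides "some remaining element has count 2 (or the
-- two-flag) AND some remaining element has count 3 (or the three-flag)".
theorem pvLoopA_eq (array : List Int) :
    ∀ (rest : List Int) (two three : Bool), (two && three) = false →
      pvLoopA array rest two three =
        ((two || rest.any (fun el => array.count el = 2)) &&
         (three || rest.any (fun el => array.count el = 3))) := by
  intro rest
  induction rest with
  | nil => intro two three h; simp [pvLoopA, h]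
  | cons el rest ih =>
    intro two three h
    simp only [pvLoopA, List.any_cons]
    by_cases h2 : array.count el = 2 <;> by_cases h3 : array.count el = 3
    all_goals try omega
    all_goals cases two <;> cases three <;> simp_all [ih]

theorem alt_eq (array : List Int) :
    check_three_and_two_alt array =
      ((array.any (fun el => array.count el = 2)) &&
       (array.any (fun el => array.count el = 3))) := by
  unfold check_three_and_two_alt
  have hnd : (array.foldl (fun d x => d.insert x (d.getD x 0 + 1)) (PySem.Dict.empty : PySem.Dict Int Int)).keys.Nodup :=
    PySem.Dict.nodup_keys_foldl_insert _ _ _ PySem.Dict.nodup_keys_empty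
  have hv : (array.foldl (fun d x => d.insert x (d.getD x 0 + 1)) (PySem.Dict.empty : PySem.Dict Int Int)).values
      = (array.foldl (fun d x => d.insert x (d.getD x 0 + 1)) (PySem.Dict.empty : PySem.Dict Int Int)).keys.map
          (fun k => (array.foldl (fun d x => d.insert x (d.getD x 0 + 1)) (PySem.Dict.empty : PySem.Dict Int Int)).getD k 0) :=
    PySem.Dict.values_eq_map_keys _ hnd 0
  simp only [hv, PySem.Dict.getD_foldl_insert_add_one, PySem.Dict.getD_empty, zero_add]
  congr 1 <;>
  · rw [Bool.eq_iff_iff]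
    simp only [PySem.Set.contains, List.contains_eq_mem, List.mem_map, PySem.Set.mem_ofList,
      PySem.Dict.keys_foldl_insert, PySem.Dict.keys_empty, PySem.Set.mem_update,
      List.any_eq_true, decide_eq_true_eq, List.not_mem_nil, false_or]
    constructor
    · rintro ⟨k, hk, hc⟩; exact ⟨k, hk, by omega⟩
    · rintro ⟨k, hk, hc⟩; exact ⟨k, hk, by omega⟩

-- ===== VERDICT (by name: the statement is the Claim_ definition above) =====
theorem check_three_and_two_spec : Claim_equal_check_three_and_two := by
  intro array _
  unfold Spec_check_three_and_two check_three_and_two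
  rw [pvLoopA_eq array array false false rfl, alt_eq]
  simp
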